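-- pv_equiv track=rewrite | github.com/martamako/AdventOfCode | 2015/Day11/2015-day11-1.py | rule1
-- ===== SOURCE A (Python) =====
-- def rule1(text: str) -> bool:
--     number = 0
--     for i in range(len(text) - 1):
--         if ord(text[i + 1]) - ord(text[i]) == 1:
--             number += 1
--             if number >= 2:
--                 return True
--         else:
--             number = 0
--
--     return number > 2
-- ===== SOURCE B (Python) =====
-- def rule1(text: str) -> bool:
--     for i in range(len(text) - 2):
--         if ord(text[i + 1]) - ord(text[i]) == 1 and ord(text[i + 2]) - ord(text[i + 1]) == 1:
--             return True
--     return False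
-- ===== Notes on version B (the rewrite author's own statement) =====
-- stated objective: simpler
-- what changed: Replaced the stateful run-length counter (with early return and a dead final 'number > 2' branch) by a direct stateless sliding window of three characters.
import Mathlib
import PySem

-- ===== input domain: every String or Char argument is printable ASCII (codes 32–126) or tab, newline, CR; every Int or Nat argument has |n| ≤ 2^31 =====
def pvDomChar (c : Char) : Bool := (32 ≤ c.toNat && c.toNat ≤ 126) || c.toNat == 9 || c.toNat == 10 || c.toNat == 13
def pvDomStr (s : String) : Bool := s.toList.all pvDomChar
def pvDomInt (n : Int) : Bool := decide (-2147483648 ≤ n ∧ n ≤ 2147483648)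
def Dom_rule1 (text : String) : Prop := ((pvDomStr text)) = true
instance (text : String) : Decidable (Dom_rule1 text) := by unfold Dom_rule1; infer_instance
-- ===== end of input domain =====

-- B replaces A's running counter by a stateless sliding window of three characters (simpler decomposition, same cost).

-- ===== PORT A =====
-- loop over adjacent pairs carrying the run counter `number`; early return on number >= 2
def rule1Go : List Char → Nat → Bool
  | a :: b :: rest, number =>
      if ((b.toNat : Int) - (a.toNat : Int)) == 1 then
        if number + 1 ≥ 2 then true else rule1Go (b :: rest) (number + 1)
      else rule1Go (b :: rest) 0
  | _, number => decide (number > 2)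

def rule1 (text : String) : Bool := rule1Go text.toList 0

-- ===== PORT B =====
-- stateless scan of each window of three consecutive characters
def rule1AltGo : List Char → Bool
  | a :: b :: c :: rest =>
      if (((b.toNat : Int) - (a.toNat : Int)) == 1 && ((c.toNat : Int) - (b.toNat : Int)) == 1) then
        true
      else rule1AltGo (b :: c :: rest)
  | _ => false

def rule1_alt (text : String) : Bool := rule1AltGo text.toList

-- ===== PRECONDITION & SPEC =====
def Spec_rule1 (text : String) (out : Bool) : Prop := out = rule1_alt text
instance (text : String) (out : Bool) : Decidable (Spec_rule1 text out) := by unfold Spec_rule1; infer_instance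

-- ===== CLAIM (what is proved, stated in full; the proofs are below) =====
def Claim_equal_rule1 : Prop := ∀ (text : String), Dom_rule1 text → Spec_rule1 text (rule1 text)

-- ===== LEMMAS AND PROOFS =====

-- skipping a first pair that is not part of a straight does not change B's answer
theorem altGo_skip (b c : Char) (r : List Char)
    (h : (((c.toNat : Int) - (b.toNat : Int)) == 1) = false) :
    rule1AltGo (b :: c :: r) = rule1AltGo (c :: r) := by
  cases r with
  | nil => simp [rule1AltGo]
  | cons d r' => simp [rule1AltGo, h]

-- A with counter 1: a straight closes at the next pair, else the counter resets
theorem go_one (cs : List Char) :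
    rule1Go cs 1 = (match cs with
      | a :: b :: rest =>
          if ((b.toNat : Int) - (a.toNat : Int)) == 1 then true else rule1Go (b :: rest) 0
      | _ => false) := by
  match cs with
  | [] => simp [rule1Go]
  | [a] => simp [rule1Go]
  | a :: b :: rest => simp [rule1Go]

-- main invariant: A's loop from counter 0 equals B's window scan
theorem go_zero (n : Nat) : ∀ cs : List Char, cs.length ≤ n → rule1Go cs 0 = rule1AltGo cs := by
  induction n with
  | zero =>
    intro cs h
    have : cs = [] := List.eq_nil_of_length_eq_zero (Nat.le_zero.mp h)
    simp [this, rule1Go, rule1AltGo]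
  | succ n ih =>
    intro cs h
    match cs with
    | [] => simp [rule1Go, rule1AltGo]
    | [a] => simp [rule1Go, rule1AltGo]
    | a :: b :: rest =>
      by_cases hab : (((b.toNat : Int) - (a.toNat : Int)) == 1) = true
      · rw [show rule1Go (a :: b :: rest) 0 = rule1Go (b :: rest) 1 by simp [rule1Go, hab]]
        rw [go_one]
        match rest with
        | [] => simp [rule1AltGo]
        | c :: r' =>
          by_cases hbc : (((c.toNat : Int) - (b.toNat : Int)) == 1) = true
          · simp [rule1AltGo, hab, hbc]
          · have hbc' : (((c.toNat : Int) - (b.toNat : Int)) == 1) = false :=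
              Bool.eq_false_iff.mpr hbc
            simp only [hbc']
            rw [show rule1AltGo (a :: b :: c :: r') = rule1AltGo (b :: c :: r') by
                  simp [rule1AltGo, hbc']]
            rw [altGo_skip b c r' hbc']
            exact ih (c :: r') (by simp only [List.length_cons] at h ⊢; omega)
      · have hab' : (((b.toNat : Int) - (a.toNat : Int)) == 1) = false :=
          Bool.eq_false_iff.mpr hab
        rw [show rule1Go (a :: b :: rest) 0 = rule1Go (b :: rest) 0 by simp [rule1Go, hab']]
        match rest with
        | [] => simp [rule1Go, rule1AltGo]
        | c :: r' =>
          rw [ih (b :: c :: r') (by simp only [List.length_cons] at h ⊢; omega)]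
          rw [show rule1AltGo (a :: b :: c :: r') = rule1AltGo (b :: c :: r') by
                simp [rule1AltGo, hab']]

-- ===== VERDICT (by name: the statement is the Claim_ definition above) =====
theorem rule1_spec : Claim_equal_rule1 := by
  intro text _
  unfold Spec_rule1 rule1 rule1_alt
  exact go_zero text.toList.length text.toList (Nat.le_refl _)
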